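-- pv_equiv track=rewrite | github.com/davidbelfiori/Foi | provaferretti.py | foo
-- ===== SOURCE A (Python) =====
-- def foo(s):
--     n=""
--     for i in range(0,len(s)):
--         for j in range(0,len(s)):
--             if j>i:
--                 if (s[i]==s[j] and s[i]!="" ):
--                     n+=s.replace(s[j],"*")
--
--
--     return n
-- ===== SOURCE B (Python) =====
-- def foo(s):
--     remaining = {}
--     for c in s:
--         remaining[c] = remaining.get(c, 0) + 1
--     cache = {}
--     parts = []
--     for c in s:
--         remaining[c] = remaining[c] - 1
--         if c not in cache:
--             cache[c] = s.replace(c, "*")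
--         parts.append(cache[c] * remaining[c])
--     return "".join(parts)
-- ===== Notes on version B (the rewrite author's own statement) =====
-- stated objective: alternative
-- what changed: Replaces A's quadratic double index scan (appending one masked copy per equal pair i<j) by a single pass over the string that maintains a precomputed character count table and a per-character masked-copy cache, appending each cached copy once per later equal occurrence and joining the collected parts at the end.
import Mathlib
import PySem

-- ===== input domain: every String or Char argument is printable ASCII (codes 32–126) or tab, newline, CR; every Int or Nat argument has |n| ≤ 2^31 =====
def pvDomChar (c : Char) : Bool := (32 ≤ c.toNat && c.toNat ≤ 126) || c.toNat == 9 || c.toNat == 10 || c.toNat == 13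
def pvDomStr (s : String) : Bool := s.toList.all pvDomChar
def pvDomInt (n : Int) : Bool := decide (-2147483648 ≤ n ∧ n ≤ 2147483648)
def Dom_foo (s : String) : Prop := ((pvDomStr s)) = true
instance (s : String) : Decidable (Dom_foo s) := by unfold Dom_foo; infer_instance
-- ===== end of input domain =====

-- B replaces A's quadratic pair scan by a one-pass count table + per-character replace cache (alternative algorithm).


-- ===== PORT A =====
-- literal port of A's nested index loops; Python's always-true `s[i] != ""` is kept as `[c] ≠ []`
def fooA (cs : List Char) : List Char :=
  (PySem.List.pyRange 0 (cs.length : Int)).foldl (fun (n : List Char) (i : Int) =>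
    (PySem.List.pyRange 0 (cs.length : Int)).foldl (fun (n : List Char) (j : Int) =>
      if i < j then
        if PySem.List.pyGetD cs i ' ' = PySem.List.pyGetD cs j ' ' ∧
           [PySem.List.pyGetD cs i ' '] ≠ ([] : List Char) then
          n ++ PySem.Chars.replace cs [PySem.List.pyGetD cs j ' '] ['*']
        else n
      else n) n) []

def foo (s : String) : String := String.mk (fooA s.toList)

-- ===== PORT B =====
-- s.replace(c, "*")
def replStar (full : List Char) (c : Char) : List Char := PySem.Chars.replace full [c] ['*']

-- one iteration of B's main loop: decrement remaining[c], fill the cache on first sight, append the block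
def fooBStep (full : List Char)
    (st : PySem.Dict Char Int × PySem.Dict Char (List Char) × List (List Char)) (c : Char) :
    PySem.Dict Char Int × PySem.Dict Char (List Char) × List (List Char) :=
  let rem := st.1.insert c (st.1.getD c 0 - 1)
  let cache := if st.2.1.contains c then st.2.1 else st.2.1.insert c (replStar full c)
  (rem, cache, st.2.2 ++ [PySem.List.pyRepeat (cache.getD c []) (rem.getD c 0)])

-- build the count table, run the main loop, join the collected parts
def fooB (cs : List Char) : List Char :=
  PySem.Chars.join []
    (cs.foldl (fooBStep cs)
      (((cs.foldl (fun d c => d.insert c (d.getD c 0 + 1)) PySem.Dict.empty),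
        PySem.Dict.empty, ([] : List (List Char))))).2.2

def foo_alt (s : String) : String := String.mk (fooB s.toList)

-- ===== PRECONDITION & SPEC =====
def Spec_foo (s : String) (out : String) : Prop := out = foo_alt s
instance (s : String) (out : String) : Decidable (Spec_foo s out) := by unfold Spec_foo; infer_instance

-- ===== CLAIM (what is proved, stated in full; the proofs are below) =====
def Claim_equal_foo : Prop := ∀ (s : String), Dom_foo s → Spec_foo s (foo s)

-- ===== LEMMAS AND PROOFS =====

-- common canonical form: for each position, the masked copy repeated (occurrences strictly later) times
def specF (full : List Char) : List Char → List (List Char)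
  | [] => []
  | c :: t => PySem.List.pyRepeat (replStar full c) (t.count c : Int) :: specF full t

-- count of x in l read through getD over the index range
theorem countP_getD (l : List Char) (x d : Char) :
    (List.range l.length).countP (fun j => decide (l.getD j d = x)) = l.count x := by
  induction l with
  | nil => simp
  | cons c t ih =>
    rw [List.length_cons, List.range_succ_eq_map, List.countP_cons, List.countP_map]
    have hcomp : ((fun j => decide ((c :: t).getD j d = x)) ∘ Nat.succ)
        = (fun j => decide (t.getD j d = x)) := by
      funext j
      simp only [Function.comp_apply, Nat.succ_eq_add_one, List.getD_cons_succ]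
    rw [hcomp, ih]
    simp only [List.getD_cons_zero, List.count_cons]
    by_cases hx : c = x <;> simp [hx]

-- the pair condition over the index range counts the occurrences strictly after i
theorem countP_range_shift (l : List Char) (x d : Char) (i : Nat) :
    (List.range l.length).countP (fun j => decide (i < j ∧ l.getD j d = x))
      = (l.drop (i+1)).count x := by
  induction l generalizing i with
  | nil => simp
  | cons c t ih =>
    rw [List.length_cons, List.range_succ_eq_map, List.countP_cons, List.countP_map]
    cases i with
    | zero =>
      have hcomp : ((fun j => decide (0 < j ∧ (c :: t).getD j d = x)) ∘ Nat.succ)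
          = (fun j => decide (t.getD j d = x)) := by
        funext j
        simp only [Function.comp_apply, Nat.succ_eq_add_one, List.getD_cons_succ]
        simp
      rw [hcomp, countP_getD]
      simp
    | succ i' =>
      have hcomp : ((fun j => decide (i' + 1 < j ∧ (c :: t).getD j d = x)) ∘ Nat.succ)
          = (fun j => decide (i' < j ∧ t.getD j d = x)) := by
        funext j
        simp only [Function.comp_apply, Nat.succ_eq_add_one, List.getD_cons_succ]
        simp
      rw [hcomp, ih]
      simp

theorem flatten_map_ite (l : List Nat) (P : Nat → Prop) [DecidablePred P] (B : List Char) :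
    (l.map (fun j => if P j then B else [])).flatten
      = (List.replicate (l.countP (fun j => decide (P j))) B).flatten := by
  induction l with
  | nil => simp
  | cons a t ih =>
    by_cases h : P a <;> simp [h, ih, List.replicate_succ]

-- A's inner loop over j, for a fixed outer index i
theorem innerA (cs : List Char) (i : Nat) (n : List Char) :
    (List.range cs.length).foldl (fun (n : List Char) (j : Nat) =>
        if (i : Int) < (j : Int) then
          if PySem.List.pyGetD cs (i : Int) ' ' = PySem.List.pyGetD cs (j : Int) ' ' ∧
             [PySem.List.pyGetD cs (i : Int) ' '] ≠ ([] : List Char) then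
            n ++ PySem.Chars.replace cs [PySem.List.pyGetD cs (j : Int) ' '] ['*']
          else n
        else n) n
      = n ++ PySem.List.pyRepeat (replStar cs (cs.getD i ' '))
          (((cs.drop (i+1)).count (cs.getD i ' ') : Int)) := by
  have hcongr : ∀ (acc : List Char), ∀ j ∈ List.range cs.length,
      (if (i : Int) < (j : Int) then
          if PySem.List.pyGetD cs (i : Int) ' ' = PySem.List.pyGetD cs (j : Int) ' ' ∧
             [PySem.List.pyGetD cs (i : Int) ' '] ≠ ([] : List Char) then
            acc ++ PySem.Chars.replace cs [PySem.List.pyGetD cs (j : Int) ' '] ['*']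
          else acc
        else acc)
      = acc ++ (if i < j ∧ cs.getD j ' ' = cs.getD i ' ' then replStar cs (cs.getD i ' ') else []) := by
    intro acc j hj
    simp only [PySem.List.pyGetD_natCast]
    by_cases h1 : i < j
    · have h1' : (i : Int) < (j : Int) := by exact_mod_cast h1
      rw [if_pos h1']
      by_cases h2 : cs.getD j ' ' = cs.getD i ' '
      · rw [h2]
        simp [h1, replStar]
      · rw [if_neg (fun hh => h2 (And.left hh).symm),
            if_neg (fun hh : _ ∧ _ => h2 hh.2), List.append_nil]
    · have h1' : ¬ ((i : Int) < (j : Int)) := by exact_mod_cast h1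
      rw [if_neg h1', if_neg (fun hh : _ ∧ _ => h1 hh.1), List.append_nil]
  refine Eq.trans (PySem.List.foldl_congr_mem (List.range cs.length) _
    (fun acc j => acc ++ (if i < j ∧ cs.getD j ' ' = cs.getD i ' '
      then replStar cs (cs.getD i ' ') else [])) n hcongr) ?_
  rw [PySem.List.foldl_append_eq_flatMap]
  congr 1
  rw [List.flatMap_def, flatten_map_ite, countP_range_shift]
  simp [PySem.List.pyRepeat]

-- the same, phrased over the cast index list that pyRange produces
theorem innerA' (cs : List Char) (i : Nat) (n : List Char) :
    ((List.range cs.length).map (fun (k : Nat) => (k : Int))).foldl (fun (n : List Char) (j : Int) =>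
        if (i : Int) < j then
          if PySem.List.pyGetD cs (i : Int) ' ' = PySem.List.pyGetD cs j ' ' ∧
             [PySem.List.pyGetD cs (i : Int) ' '] ≠ ([] : List Char) then
            n ++ PySem.Chars.replace cs [PySem.List.pyGetD cs j ' '] ['*']
          else n
        else n) n
      = n ++ PySem.List.pyRepeat (replStar cs (cs.getD i ' '))
          (((cs.drop (i+1)).count (cs.getD i ' ') : Int)) := by
  rw [List.foldl_map]
  exact innerA cs i n

-- A equals the canonical form, index-shift induction
theorem specF_index (full l : List Char) :
    (List.range l.length).flatMap (fun i =>
        PySem.List.pyRepeat (replStar full (l.getD i ' '))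
          (((l.drop (i+1)).count (l.getD i ' ') : Int)))
      = (specF full l).flatten := by
  induction l with
  | nil => simp [specF]
  | cons c t ih =>
    simp only [List.length_cons, List.range_succ_eq_map, List.flatMap_cons, List.flatMap_map]
    simp only [Nat.succ_eq_add_one, List.getD_cons_succ, List.getD_cons_zero,
      List.drop_succ_cons, List.drop_zero, specF, List.flatten_cons]
    rw [ih]

theorem fooA_eq_specF (cs : List Char) : fooA cs = (specF cs cs).flatten := by
  unfold fooA
  rw [PySem.List.pyRange_zero_natCast, List.foldl_map]
  refine Eq.trans (PySem.List.foldl_congr_mem (List.range cs.length) _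
    (fun (acc : List Char) (i : Nat) => acc ++ PySem.List.pyRepeat (replStar cs (cs.getD i ' '))
      (((cs.drop (i+1)).count (cs.getD i ' ') : Int))) [] ?_) ?_
  · intro acc i _
    exact innerA' cs i acc
  · rw [PySem.List.foldl_append_eq_flatMap]
    simp only [List.nil_append]
    exact specF_index cs cs

-- B's main loop invariant: remaining = counts of the unprocessed suffix, cache holds masked copies
theorem fooB_loop (full : List Char) (t : List Char) :
    ∀ (rem : PySem.Dict Char Int) (cache : PySem.Dict Char (List Char)) (parts : List (List Char)),
    (∀ c, rem.getD c 0 = (t.count c : Int)) →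
    (∀ c v, cache.get? c = some v → v = replStar full c) →
    (t.foldl (fooBStep full) (rem, cache, parts)).2.2 = parts ++ specF full t := by
  induction t with
  | nil => intro rem cache parts _ _; simp [specF]
  | cons c t ih =>
    intro rem cache parts hr hc
    rw [List.foldl_cons]
    have hremc : (rem.insert c (rem.getD c 0 - 1)).getD c 0 = (t.count c : Int) := by
      rw [PySem.Dict.getD_insert, if_pos rfl, hr c, List.count_cons_self]
      push_cast
      ring
    have hcachec :
        (if cache.contains c then cache else cache.insert c (replStar full c)).getD c []
          = replStar full c := by
      by_cases h : cache.contains c = true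
      · rw [if_pos h]
        have hs : (cache.get? c).isSome = true := by
          unfold PySem.Dict.contains at h
          unfold PySem.Dict.get?
          rw [Option.isSome_map, List.find?_isSome]
          simpa using List.any_eq_true.mp h
        obtain ⟨v, hv⟩ := Option.isSome_iff_exists.mp hs
        unfold PySem.Dict.getD
        rw [hv, Option.getD_some]
        exact hc c v hv
      · rw [if_neg h]
        unfold PySem.Dict.getD
        rw [PySem.Dict.get?_insert_self, Option.getD_some]
    have step_eq : fooBStep full (rem, cache, parts) c
        = (rem.insert c (rem.getD c 0 - 1),
           (if cache.contains c then cache else cache.insert c (replStar full c)),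
           parts ++ [PySem.List.pyRepeat (replStar full c) (t.count c : Int)]) := by
      unfold fooBStep
      simp only [hremc, hcachec]
    rw [step_eq, ih]
    · simp [specF]
    · intro c'
      by_cases h : c' = c
      · subst h; exact hremc
      · rw [PySem.Dict.getD_insert, if_neg h, hr c',
            List.count_cons_of_ne (fun hh => h hh.symm)]
    · intro c' v hv
      by_cases h : cache.contains c = true
      · rw [if_pos h] at hv; exact hc c' v hv
      · rw [if_neg h] at hv
        by_cases h2 : c' = c
        · subst h2
          rw [PySem.Dict.get?_insert_self] at hv
          exact (Option.some_inj.mp hv).symm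
        · rw [PySem.Dict.get?_insert_of_ne _ _ h2] at hv
          exact hc c' v hv

theorem join_nil_flatten : ∀ (parts : List (List Char)),
    PySem.Chars.join [] parts = parts.flatten
  | [] => rfl
  | [a] => by simp [PySem.Chars.join, List.intercalate]
  | a :: b :: t => by
    have ih := join_nil_flatten (b :: t)
    simp only [PySem.Chars.join, List.intercalate] at ih ⊢
    have h : List.intersperse ([] : List Char) (a :: b :: t)
        = a :: [] :: List.intersperse [] (b :: t) := rfl
    rw [h, List.flatten_cons, List.flatten_cons, ih]
    simp

theorem fooB_eq_specF (cs : List Char) : fooB cs = (specF cs cs).flatten := by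
  have hr : ∀ c, (cs.foldl (fun d c => d.insert c (d.getD c 0 + 1))
      PySem.Dict.empty).getD c 0 = (cs.count c : Int) := by
    intro c
    show (cs.foldl (fun d x => d.modify x 0 (fun v => v + 1))
        PySem.Dict.empty).getD c 0 = (cs.count c : Int)
    rw [PySem.Dict.getD_foldl_modify_add_one]
    show (0 : Int) + (cs.count c : Int) = (cs.count c : Int)
    ring
  have hc : ∀ (c : Char) (v : List Char),
      (PySem.Dict.empty : PySem.Dict Char (List Char)).get? c = some v → v = replStar cs c := by
    intro c v hv
    simp [PySem.Dict.get?, PySem.Dict.empty] at hv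
  unfold fooB
  rw [fooB_loop cs cs _ _ _ hr hc, join_nil_flatten]
  simp

-- ===== VERDICT (by name: the statement is the Claim_ definition above) =====
theorem foo_spec : Claim_equal_foo := by
  intro s _
  unfold Spec_foo foo foo_alt
  rw [fooA_eq_specF, fooB_eq_specF]
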